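-- pv_equiv track=rewrite | github.com/leobitz/semantic_w2v | data_handle.py | min_count_threshold
-- ===== SOURCE A (Python) =====
-- def min_count_threshold(words, min_count=5):
--     new_words = []
--     word2freq = {}
--     unkown_word = "*###*"
--     new_words.append(unkown_word)
--     for word in words:
--         if word not in word2freq:
--             word2freq[word] = 0
--         word2freq[word] += 1
--
--     freq = {}
--     freq[unkown_word] = 0
--     for word in words:
--         if word2freq[word] >= min_count:
--             new_words.append(word)
--             if word not in freq:
--                 freq[word] = 0
--             freq[word] += 1
--         else:
--             freq[unkown_word] += 1
--
--     return new_words, freq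
-- ===== SOURCE B (Python) =====
-- def min_count_threshold(words, min_count=5):
--     unknown_word = "*###*"
--     table = {}
--     for w in words:
--         table[w] = table.get(w, 0) + 1
--     new_words = [unknown_word] + [w for w in words if table[w] >= min_count]
--     freq = {unknown_word: 0}
--     below = 0
--     for w, c in table.items():
--         if c >= min_count:
--             freq[w] = c
--         else:
--             below += c
--     freq[unknown_word] += below
--     return new_words, freq
-- ===== Notes on version B (the rewrite author's own statement) =====
-- stated objective: alternative
-- what changed: B builds one frequency table over all words, then derives new_words by filtering in place and derives freq directly from the table's unique entries (kept words get their total count, below-threshold totals are summed into the unknown bucket), instead of A's per-occurrence incremental rebuild of freq.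
import Mathlib
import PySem

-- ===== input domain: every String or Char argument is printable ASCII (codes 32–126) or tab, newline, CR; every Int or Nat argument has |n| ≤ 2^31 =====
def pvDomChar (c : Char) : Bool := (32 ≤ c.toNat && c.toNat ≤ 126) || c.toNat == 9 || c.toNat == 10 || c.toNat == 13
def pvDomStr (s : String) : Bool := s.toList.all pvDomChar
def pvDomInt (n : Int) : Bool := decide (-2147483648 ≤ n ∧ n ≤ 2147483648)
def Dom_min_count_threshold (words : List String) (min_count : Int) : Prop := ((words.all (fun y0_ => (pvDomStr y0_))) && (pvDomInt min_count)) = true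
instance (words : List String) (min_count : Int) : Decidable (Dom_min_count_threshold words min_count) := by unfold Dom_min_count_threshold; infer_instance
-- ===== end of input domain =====

-- B derives the result from one aggregated frequency table (one pass over unique words) instead of
-- A's per-occurrence incremental rebuild of freq; objective: alternative decomposition, same O(n) cost.

-- ===== PORT A =====
def min_count_threshold (words : List String) (min_count : Int) : List String × (List (String × Int)) :=
  let unknown_word := "*###*"
  let new_words : List String := [unknown_word]
  let word2freq : PySem.Dict String Int :=
    words.foldl (fun d word =>
      let d := if d.contains word then d else d.insert word 0
      d.insert word (d.getD word 0 + 1)) PySem.Dict.empty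
  let st := words.foldl (fun (st : List String × PySem.Dict String Int) word =>
      if word2freq.getD word 0 ≥ min_count then
        let nw := st.1 ++ [word]
        let f := if st.2.contains word then st.2 else st.2.insert word 0
        (nw, f.insert word (f.getD word 0 + 1))
      else
        (st.1, st.2.insert unknown_word (st.2.getD unknown_word 0 + 1)))
    (new_words, (PySem.Dict.empty : PySem.Dict String Int).insert unknown_word 0)
  (st.1, st.2.items)

-- ===== PORT B =====
def min_count_threshold_alt (words : List String) (min_count : Int) : List String × (List (String × Int)) :=
  let unknown_word := "*###*"
  let table : PySem.Dict String Int :=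
    words.foldl (fun d w => d.insert w (d.getD w 0 + 1)) PySem.Dict.empty
  let new_words := unknown_word :: words.filter (fun w => table.getD w 0 ≥ min_count)
  let st := table.items.foldl
      (fun (st : PySem.Dict String Int × Int) p =>
        if p.2 ≥ min_count then (st.1.insert p.1 p.2, st.2) else (st.1, st.2 + p.2))
      ((PySem.Dict.empty : PySem.Dict String Int).insert unknown_word 0, 0)
  let freq := st.1.modify unknown_word 0 (· + st.2)
  (new_words, freq.items)

-- ===== PRECONDITION & SPEC =====
def Spec_min_count_threshold (words : List String) (min_count : Int) (out : List String × (List (String × Int))) : Prop := out = min_count_threshold_alt words min_count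
instance (words : List String) (min_count : Int) (out : List String × (List (String × Int))) : Decidable (Spec_min_count_threshold words min_count out) := by unfold Spec_min_count_threshold; infer_instance

-- ===== CLAIM (what is proved, stated in full; the proofs are below) =====
def Claim_equal_min_count_threshold : Prop := ∀ (words : List String) (min_count : Int), Dom_min_count_threshold words min_count → Spec_min_count_threshold words min_count (min_count_threshold words min_count)

-- ===== LEMMAS AND PROOFS =====

-- the "counted" word of an occurrence: itself if kept, else the unknown token
def pvKey (b : String → Bool) (u : String) (w : String) : String := if b w then w else u

-- A's first loop ("if absent insert 0, then += 1") is the plain counter step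
theorem pvStepA_eq (d : PySem.Dict String Int) (w : String) :
    (let d' := if d.contains w then d else d.insert w 0
     d'.insert w (d'.getD w 0 + 1)) = d.insert w (d.getD w 0 + 1) := by
  by_cases h : d.contains w = true
  · simp [h]
  · simp only [Bool.not_eq_true] at h
    simp [h, PySem.Dict.getD_insert_self, PySem.Dict.insert_insert_self,
      PySem.Dict.getD_of_not_contains _ _ h]

-- count of v ≠ u in the keyed list
theorem pvCount_map_key_ne (b : String → Bool) (u v : String) (hv : v ≠ u) (l : List String) :
    (l.map (pvKey b u)).count v = if b v then l.count v else 0 := by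
  induction l with
  | nil => simp
  | cons w t ih =>
    by_cases hw : w = v
    · subst hw
      by_cases hb : b w = true
      · simp [pvKey, hb, List.count_cons, ih]
      · simp only [Bool.not_eq_true] at hb
        simp [pvKey, hb, List.count_cons, ih, Ne.symm hv]
    · by_cases hb : b w = true
      · simp [pvKey, hb, List.count_cons, ih, hw]
      · simp only [Bool.not_eq_true] at hb
        have hk : pvKey b u w = u := by simp [pvKey, hb]
        simp [hk, List.count_cons, ih, hw, Ne.symm hv]

-- count of u in the keyed list
theorem pvCount_map_key_self (b : String → Bool) (u : String) (l : List String) :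
    (l.map (pvKey b u)).count u = l.countP (fun w => !b w) + (if b u then l.count u else 0) := by
  induction l with
  | nil => simp
  | cons w t ih =>
    by_cases hb : b w = true
    · have hk : pvKey b u w = w := by simp [pvKey, hb]
      by_cases hw : w = u
      · subst hw
        simp only [List.map_cons, hk, List.count_cons, List.countP_cons, hb, ih,
          Bool.not_true, beq_self_eq_true, if_true]
        simp
        all_goals omega
      · simp only [List.map_cons, hk, List.count_cons, List.countP_cons, hb, ih, Bool.not_true]
        simp [hw]
    · simp only [Bool.not_eq_true] at hb
      have hk : pvKey b u w = u := by simp [pvKey, hb]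
      by_cases hw : w = u
      · subst hw
        simp only [List.map_cons, hk, List.count_cons, List.countP_cons, hb, ih, Bool.not_false]
        simp
        all_goals omega
      · simp only [List.map_cons, hk, List.count_cons, List.countP_cons, hb, ih, Bool.not_false]
        simp [hw]
        all_goals omega

-- updating a set that already holds u with the keyed occurrences = updating with the kept occurrences
theorem pvUpdate_map_key (b : String → Bool) (u : String) (l : List String) :
    ∀ (s : PySem.Set String), u ∈ s →
      PySem.Set.update s (l.map (pvKey b u)) = PySem.Set.update s (l.filter b) := by
  induction l with
  | nil => intro s _; rfl
  | cons w t ih =>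
    intro s hu
    by_cases hb : b w = true
    · have : pvKey b u w = w := by simp [pvKey, hb]
      simp only [List.map_cons, this, List.filter_cons, hb, if_true, PySem.Set.update_cons]
      exact ih _ (by simp [PySem.Set.mem_add, hu])
    · simp only [Bool.not_eq_true] at hb
      have hk : pvKey b u w = u := by simp [pvKey, hb]
      simp only [List.map_cons, hk, List.filter_cons, hb, PySem.Set.update_cons,
        PySem.Set.add_of_mem hu, Bool.false_eq_true, if_false]
      exact ih _ hu

-- set(filter) = filter(set)
theorem pvOfList_filter (p : String → Bool) (l : List String) :
    PySem.Set.ofList (l.filter p) = (PySem.Set.ofList l).filter p := by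
  induction l using List.reverseRecOn with
  | nil => rfl
  | append_singleton t x ih =>
    by_cases hp : p x = true
    · rw [List.filter_append]
      simp only [List.filter_cons, hp, if_true, List.filter_nil]
      rw [PySem.Set.ofList_append_singleton, PySem.Set.ofList_append_singleton, ih]
      by_cases hx : x ∈ PySem.Set.ofList t
      · rw [PySem.Set.add_of_mem hx, PySem.Set.add_of_mem (by simp [List.mem_filter, hx, hp])]
      · rw [PySem.Set.add_of_not_mem hx,
            PySem.Set.add_of_not_mem (by simp [List.mem_filter, hx]), List.filter_append]
        simp [hp]
    · simp only [Bool.not_eq_true] at hp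
      rw [List.filter_append]
      simp only [List.filter_cons, hp, Bool.false_eq_true, if_false, List.filter_nil,
        List.append_nil, PySem.Set.ofList_append_singleton, ih]
      by_cases hx : x ∈ PySem.Set.ofList t
      · rw [PySem.Set.add_of_mem hx]
      · rw [PySem.Set.add_of_not_mem hx, List.filter_append]
        simp [hp]

-- Σ over a nodup set of per-word counts = countP over the raw list
theorem pvSum_counts (S : List String) (q : String → Bool) (hnd : S.Nodup)
    (hq : ∀ k ∈ S, q k = true) :
    ∀ (l : List String), (∀ w ∈ l, q w = true → w ∈ S) →
      (S.map (fun k => (l.count k : Int))).sum = (l.countP q : Int) := by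
  intro l
  induction l with
  | nil => intro _; simp
  | cons w t ih =>
    intro hmem
    have hf : (fun k => (((w :: t).count k : Nat) : Int))
        = (fun k => ((t.count k : Nat) : Int) + if w = k then (1 : Int) else 0) := by
      funext k
      by_cases h : w = k <;> simp [List.count_cons, h]
    have h1 : (S.map (fun k => (((w :: t).count k : Nat) : Int))).sum
        = (S.map (fun k => ((t.count k : Nat) : Int))).sum
          + (S.map (fun k => if w = k then (1 : Int) else 0)).sum := by
      rw [hf, PySem.List.sum_map_add_int]
    have h2 : (S.map (fun k => if w = k then (1 : Int) else 0)).sum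
        = if w ∈ S then (1 : Int) else 0 := by
      clear hq hmem ih h1
      induction S with
      | nil => simp
      | cons a s ihs =>
        have hnd' : s.Nodup := hnd.of_cons
        by_cases ha : w = a
        · subst ha
          have : w ∉ s := (List.nodup_cons.mp hnd).1
          simp [ihs hnd', this]
        · simp [ha, Ne.symm ha, ihs hnd']
    rw [h1, h2, ih (fun x hx h => hmem x (List.mem_cons_of_mem _ hx) h)]
    by_cases hw : q w = true
    · have : w ∈ S := hmem w (List.mem_cons_self) hw
      simp [List.countP_cons, hw, this]
      all_goals (push_cast; ring)
    · have hns : w ∉ S := fun h => hw (hq w h)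
      simp only [Bool.not_eq_true] at hw
      simp [List.countP_cons, hw, hns]

-- getD after an insert-fold over distinct keys
theorem pvGetD_insfold (g : String → Int) (v : String) :
    ∀ (M : List String) (d : PySem.Dict String Int), M.Nodup →
      ((M.foldl (fun d k => d.insert k (g k)) d).getD v 0)
        = if v ∈ M then g v else d.getD v 0 := by
  intro M
  induction M with
  | nil => intro d _; simp
  | cons k t ih =>
    intro d hnd
    simp only [List.foldl_cons]
    rw [ih _ hnd.of_cons]
    by_cases hv : v ∈ t
    · have : v ≠ k := fun h => ((List.nodup_cons.mp hnd).1) (h ▸ hv)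
      simp [hv, this]
    · by_cases hvk : v = k
      · subst hvk
        simp [hv, PySem.Dict.getD_insert_self]
      · simp [hv, hvk, PySem.Dict.getD_insert _ _ _ _ _]

-- the keep-predicate: the word's total frequency reaches the threshold
def pvKeep (words : List String) (mc : Int) (w : String) : Bool :=
  decide (mc ≤ ((words.count w : Nat) : Int))

-- the two independent components of A's second loop
def pvFstepA (words : List String) (mc : Int) (a : List String) (w : String) : List String :=
  if pvKeep words mc w then a ++ [w] else a
def pvGstepA (words : List String) (mc : Int) (d : PySem.Dict String Int) (w : String) :
    PySem.Dict String Int :=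
  d.insert (pvKey (pvKeep words mc) "*###*" w) (d.getD (pvKey (pvKeep words mc) "*###*" w) 0 + 1)
-- the two independent components of B's loop over the table's items
def pvDstepB (mc : Int) (d : PySem.Dict String Int) (p : String × Int) : PySem.Dict String Int :=
  if decide (mc ≤ p.2) then d.insert p.1 p.2 else d
def pvBstepB (mc : Int) (b : Int) (p : String × Int) : Int :=
  if !decide (mc ≤ p.2) then b + p.2 else b

theorem min_count_threshold_eq_alt (words : List String) (mc : Int) :
    min_count_threshold words mc = min_count_threshold_alt words mc := by
  simp only [min_count_threshold, min_count_threshold_alt]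
  -- A's first loop is the plain counter
  have hA1 : words.foldl (fun (d : PySem.Dict String Int) word =>
      let d' := if d.contains word then d else d.insert word 0
      d'.insert word (d'.getD word 0 + 1)) PySem.Dict.empty = PySem.Dict.counter words := by
    have hf : (fun (d : PySem.Dict String Int) word =>
        let d' := if d.contains word then d else d.insert word 0
        d'.insert word (d'.getD word 0 + 1))
        = (fun (d : PySem.Dict String Int) word => d.insert word (d.getD word 0 + 1)) := by
      funext d w; exact pvStepA_eq d w
    rw [hf, PySem.Dict.foldl_insert_getD_add_one_eq_counter]
  rw [hA1]
  rw [PySem.Dict.foldl_insert_getD_add_one_eq_counter]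
  -- A's second loop splits into two independent folds
  have hstepA : (fun (st : List String × PySem.Dict String Int) word =>
      if (PySem.Dict.counter words).getD word 0 ≥ mc then
        (st.1 ++ [word],
          (if st.2.contains word then st.2 else st.2.insert word 0).insert word
            ((if st.2.contains word then st.2 else st.2.insert word 0).getD word 0 + 1))
      else (st.1, st.2.insert "*###*" (st.2.getD "*###*" 0 + 1)))
      = (fun st word => (pvFstepA words mc st.1 word, pvGstepA words mc st.2 word)) := by
    funext st w
    by_cases h : mc ≤ ((words.count w : Nat) : Int)
    · have hc : (PySem.Dict.counter words).getD w 0 ≥ mc := by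
        rw [PySem.Dict.getD_counter]; exact h
      have hk : pvKeep words mc w = true := by simp [pvKeep, h]
      simp only [if_pos hc, pvFstepA, pvGstepA, hk, if_true, pvKey]
      exact congrArg (Prod.mk (st.1 ++ [w])) (pvStepA_eq st.2 w)
    · have hc : ¬ ((PySem.Dict.counter words).getD w 0 ≥ mc) := by
        rw [PySem.Dict.getD_counter]; exact h
      have hk : pvKeep words mc w = false := by simp [pvKeep, h]
      simp only [if_neg hc, pvFstepA, pvGstepA, hk, Bool.false_eq_true, if_false, pvKey]
  rw [hstepA, PySem.List.foldl_prod_mk]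
  -- B's pair fold splits as well
  have hstepB : (fun (st : PySem.Dict String Int × Int) (p : String × Int) =>
      if p.2 ≥ mc then (st.1.insert p.1 p.2, st.2) else (st.1, st.2 + p.2))
      = (fun st p => (pvDstepB mc st.1 p, pvBstepB mc st.2 p)) := by
    funext st p
    by_cases h : mc ≤ p.2 <;> simp [pvDstepB, pvBstepB, h]
  rw [hstepB, PySem.List.foldl_prod_mk]
  -- A's new_words
  have hfst : List.foldl (pvFstepA words mc) ["*###*"] words
      = "*###*" :: words.filter (pvKeep words mc) := by
    have h := PySem.List.foldl_append_if (pvKeep words mc) id words ["*###*"]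
    simp only [List.map_id] at h
    exact h
  rw [hfst]
  -- A's freq is a counting fold over the keyed occurrences
  have hGA : List.foldl (pvGstepA words mc) (PySem.Dict.empty.insert "*###*" 0) words
      = List.foldl (fun (d : PySem.Dict String Int) x => d.insert x (d.getD x 0 + 1))
          (PySem.Dict.empty.insert "*###*" 0)
          (words.map (pvKey (pvKeep words mc) "*###*")) :=
    (List.foldl_map (f := pvKey (pvKeep words mc) "*###*")
      (g := fun (d : PySem.Dict String Int) x => d.insert x (d.getD x 0 + 1))
      (l := words) (init := PySem.Dict.empty.insert "*###*" 0)).symm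
  rw [hGA]
  -- B's dict component: one insert per kept distinct word
  have hDB : List.foldl (pvDstepB mc) (PySem.Dict.empty.insert "*###*" 0)
        (PySem.Dict.counter words).items
      = List.foldl (fun (d : PySem.Dict String Int) k =>
            d.insert k ((words.count k : Nat) : Int))
          (PySem.Dict.empty.insert "*###*" 0)
          ((PySem.Set.ofList words).filter (pvKeep words mc)) := by
    rw [PySem.Dict.items_counter]
    have h1 := @List.foldl_filter (String × Int) (PySem.Dict String Int)
        (fun p => decide (mc ≤ p.2)) (fun d p => d.insert p.1 p.2)
        (List.map (fun k => (k, ((words.count k : Nat) : Int))) (PySem.Set.ofList words))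
        (PySem.Dict.empty.insert "*###*" 0)
    have h2 : (List.map (fun k => (k, ((words.count k : Nat) : Int)))
          (PySem.Set.ofList words)).filter (fun p => decide (mc ≤ p.2))
        = List.map (fun k => (k, ((words.count k : Nat) : Int)))
            ((PySem.Set.ofList words).filter (pvKeep words mc)) := by
      rw [List.filter_map]
      rfl
    have h3 := @List.foldl_map String (String × Int) (PySem.Dict String Int)
        (fun k => (k, ((words.count k : Nat) : Int))) (fun d p => d.insert p.1 p.2)
        ((PySem.Set.ofList words).filter (pvKeep words mc))
        (PySem.Dict.empty.insert "*###*" 0)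
    exact h1.symm.trans ((congrArg _ h2).trans h3)
  rw [hDB]
  -- B's "below" accumulator: total count of the dropped words
  have hBB : List.foldl (pvBstepB mc) 0 (PySem.Dict.counter words).items
      = ((words.countP (fun w => !pvKeep words mc w) : Nat) : Int) := by
    rw [PySem.Dict.items_counter]
    have h1 := @List.foldl_filter (String × Int) Int
        (fun p => !decide (mc ≤ p.2)) (fun b p => b + p.2)
        (List.map (fun k => (k, ((words.count k : Nat) : Int))) (PySem.Set.ofList words)) 0
    have h2 : (List.map (fun k => (k, ((words.count k : Nat) : Int)))
          (PySem.Set.ofList words)).filter (fun p => !decide (mc ≤ p.2))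
        = List.map (fun k => (k, ((words.count k : Nat) : Int)))
            ((PySem.Set.ofList words).filter (fun k => !pvKeep words mc k)) := by
      rw [List.filter_map]
      rfl
    have h3 := @List.foldl_map String (String × Int) Int
        (fun k => (k, ((words.count k : Nat) : Int))) (fun b p => b + p.2)
        ((PySem.Set.ofList words).filter (fun k => !pvKeep words mc k)) 0
    have h4 := PySem.List.foldl_add
        ((PySem.Set.ofList words).filter (fun k => !pvKeep words mc k))
        (fun k => ((words.count k : Nat) : Int)) 0
    have h5 : ((((PySem.Set.ofList words).filter (fun k => !pvKeep words mc k)).map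
          (fun k => ((words.count k : Nat) : Int))).sum)
        = ((words.countP (fun w => !pvKeep words mc w) : Nat) : Int) := by
      apply pvSum_counts
      · exact (PySem.Set.nodup_ofList words).filter _
      · intro k hk
        exact (List.mem_filter.mp hk).2
      · intro w hw hq
        exact List.mem_filter.mpr ⟨(PySem.Set.mem_ofList words w).mpr hw, hq⟩
    calc List.foldl (pvBstepB mc) 0
          (List.map (fun k => (k, ((words.count k : Nat) : Int))) (PySem.Set.ofList words))
        = List.foldl (fun b (p : String × Int) => b + p.2) 0
            (List.map (fun k => (k, ((words.count k : Nat) : Int)))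
              ((PySem.Set.ofList words).filter (fun k => !pvKeep words mc k))) :=
          h1.symm.trans (congrArg _ h2)
      _ = ((words.countP (fun w => !pvKeep words mc w) : Nat) : Int) := by
          rw [h3]
          have := h4
          simp only [zero_add] at this
          exact this.trans h5
  rw [hBB]
  dsimp only
  -- the two new_words lists agree
  have hpred : (fun w => decide ((PySem.Dict.counter words).getD w 0 ≥ mc)) = pvKeep words mc := by
    funext w
    simp [pvKeep, PySem.Dict.getD_counter, ge_iff_le]
  rw [hpred]
  -- initial dict facts
  have hd0keys : (PySem.Dict.empty.insert "*###*" 0 : PySem.Dict String Int).keys = ["*###*"] := rfl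
  have hd0getD : ∀ v, (PySem.Dict.empty.insert "*###*" 0 : PySem.Dict String Int).getD v 0 = 0 := by
    intro v
    by_cases hv : v = "*###*" <;>
      simp [PySem.Dict.getD_insert, hv, PySem.Dict.getD_empty]
  -- names
  set kf := pvKey (pvKeep words mc) "*###*" with hkfdef
  set M := (PySem.Set.ofList words).filter (pvKeep words mc) with hMdef
  set freqA := List.foldl (fun (d : PySem.Dict String Int) x => d.insert x (d.getD x 0 + 1))
      (PySem.Dict.empty.insert "*###*" 0) (words.map kf) with hfAdef
  set dB := List.foldl (fun (d : PySem.Dict String Int) k =>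
      d.insert k ((words.count k : Nat) : Int)) (PySem.Dict.empty.insert "*###*" 0) M with hdBdef
  have hMnodup : M.Nodup := (PySem.Set.nodup_ofList words).filter _
  -- A's freq: keys / values
  have hAkeys : freqA.keys = PySem.Set.update ["*###*"] (words.map kf) := by
    rw [hfAdef, PySem.Dict.keys_foldl_insert, hd0keys]
  have hAnodup : freqA.keys.Nodup := by
    rw [hfAdef]
    exact PySem.Dict.nodup_keys_foldl_insert _ _ _ (by rw [hd0keys]; simp)
  have hAgetD : ∀ v, freqA.getD v 0 = (((words.map kf).count v : Nat) : Int) := by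
    intro v
    rw [hfAdef, PySem.Dict.getD_foldl_insert_add_one, hd0getD, zero_add]
  -- B's dict: keys / values
  have hdBkeys : dB.keys = PySem.Set.update ["*###*"] M := by
    rw [hdBdef, PySem.Dict.keys_foldl_insert, hd0keys]
  have hdBnodup : dB.keys.Nodup := by
    rw [hdBdef]
    exact PySem.Dict.nodup_keys_foldl_insert _ _ _ (by rw [hd0keys]; simp)
  have hdBgetD : ∀ v, dB.getD v 0
      = if v ∈ M then ((words.count v : Nat) : Int) else 0 := by
    intro v
    rw [hdBdef, pvGetD_insfold _ _ _ _ hMnodup, hd0getD]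
  have hunk_mem : "*###*" ∈ dB.keys := by
    rw [hdBkeys]
    exact (PySem.Set.mem_update _ _ _).mpr (Or.inl (by simp))
  set freqB := dB.modify "*###*" 0
      (fun x => x + ((words.countP (fun w => !pvKeep words mc w) : Nat) : Int)) with hfBdef
  have hBkeys : freqB.keys = dB.keys := by
    rw [hfBdef, PySem.Dict.keys_modify,
      PySem.Dict.keys_insert_of_contains _ _ ((PySem.Dict.contains_iff_mem_keys _ _).mpr hunk_mem)]
  have hBnodup : freqB.keys.Nodup := by rw [hBkeys]; exact hdBnodup
  have hBgetD : ∀ v, freqB.getD v 0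
      = if v = "*###*" then dB.getD "*###*" 0 + ((words.countP (fun w => !pvKeep words mc w) : Nat) : Int)
        else dB.getD v 0 := by
    intro v
    rw [hfBdef, PySem.Dict.getD_modify]
  -- the key lists agree
  have hkeys : freqA.keys = freqB.keys := by
    rw [hAkeys, hBkeys, hdBkeys, hMdef]
    rw [pvUpdate_map_key (pvKeep words mc) "*###*" words ["*###*"] (by simp)]
    rw [PySem.Set.update_eq_append_filter, PySem.Set.update_eq_append_filter]
    rw [pvOfList_filter, pvOfList_filter, PySem.Set.ofList_ofList]
  -- the values agree
  have hmemM : ∀ v, v ∈ M ↔ (v ∈ words ∧ pvKeep words mc v = true) := by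
    intro v
    rw [hMdef, List.mem_filter, PySem.Set.mem_ofList]
  have hgd : ∀ v, freqA.getD v 0 = freqB.getD v 0 := by
    intro v
    rw [hAgetD, hBgetD]
    by_cases hv : v = "*###*"
    · subst hv
      rw [if_pos rfl, hdBgetD, pvCount_map_key_self]
      by_cases hk : pvKeep words mc "*###*" = true
      · by_cases hm : "*###*" ∈ words
        · rw [if_pos ((hmemM _).mpr ⟨hm, hk⟩)]
          simp [hk]
          all_goals (push_cast; ring)
        · rw [if_neg (fun h => hm ((hmemM _).mp h).1)]
          simp [hk, List.count_eq_zero.mpr hm]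
      · rw [if_neg (fun h => hk ((hmemM _).mp h).2)]
        simp [eq_false_of_ne_true hk]
    · rw [if_neg hv, hdBgetD, pvCount_map_key_ne _ _ _ hv]
      by_cases hk : pvKeep words mc v = true
      · by_cases hm : v ∈ words
        · rw [if_pos ((hmemM _).mpr ⟨hm, hk⟩)]
          simp [hk]
        · rw [if_neg (fun h => hm ((hmemM _).mp h).1)]
          simp [hk, List.count_eq_zero.mpr hm]
      · rw [if_neg (fun h => hk ((hmemM _).mp h).2)]
        simp [eq_false_of_ne_true hk]
  -- assemble
  have hitems : freqA.items = freqB.items := by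
    rw [PySem.Dict.items_eq_map_keys freqA hAnodup 0,
        PySem.Dict.items_eq_map_keys freqB hBnodup 0, hkeys]
    have hfun : (fun k => (k, freqA.getD k 0)) = (fun k => (k, freqB.getD k 0)) := by
      funext k
      rw [hgd k]
    rw [hfun]
  rw [hitems]


-- ===== VERDICT (by name: the statement is the Claim_ definition above) =====
theorem min_count_threshold_spec : Claim_equal_min_count_threshold := by
  intro words min_count _
  exact min_count_threshold_eq_alt words min_count
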